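-- pv_equiv track=rewrite | github.com/Kopylovdk/SchemeDraw | prod/script_v2.py | text_split
-- ===== SOURCE A (Python) =====
-- def text_split(to_split):
--     eggs = to_split.split(' ')
--     result = ''
--     for j, k in enumerate(eggs):
--         if j % 2 == 0:
--             result += k + '\n'
--         else:
--             result += k + ' '
--     return result
-- ===== SOURCE B (Python) =====
-- def text_split(to_split):
--     def emit(ws):
--         if len(ws) >= 2:
--             return ws[0] + '\n' + ws[1] + ' ' + emit(ws[2:])
--         return ws[0] + '\n' if ws else ''
--     return emit(to_split.split(' '))
-- ===== Notes on version B (the rewrite author's own statement) =====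
-- stated objective: alternative
-- what changed: Replaces the indexed loop with a per-element parity test by a two-at-a-time recursion over the word list that emits a complete newline/space pair per step, with one trailing-word case.
import Mathlib
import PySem

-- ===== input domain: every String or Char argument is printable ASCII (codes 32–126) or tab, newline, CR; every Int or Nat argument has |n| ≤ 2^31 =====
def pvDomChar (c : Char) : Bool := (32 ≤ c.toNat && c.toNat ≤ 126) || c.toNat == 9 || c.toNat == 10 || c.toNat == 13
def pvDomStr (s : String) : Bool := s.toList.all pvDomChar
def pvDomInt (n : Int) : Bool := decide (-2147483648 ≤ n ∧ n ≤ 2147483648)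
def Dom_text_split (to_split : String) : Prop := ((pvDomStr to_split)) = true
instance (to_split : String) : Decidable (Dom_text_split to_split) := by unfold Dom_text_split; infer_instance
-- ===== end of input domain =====

-- B replaces A's indexed loop with even/odd branch by a two-words-at-a-time recursion (objective: alternative decomposition, same cost).

-- ===== PORT A =====
def text_split (to_split : String) : String :=
  let eggs := PySem.Chars.splitOn to_split.toList [' ']
  String.ofList ((PySem.List.enumerate eggs 0).foldl
    (fun result jk =>
      if jk.1 % 2 == 0 then result ++ jk.2 ++ ['\n'] else result ++ jk.2 ++ [' ']) [])

-- ===== PORT B =====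
-- emit = Source B's inner recursive helper (two words per step, trailing word, empty)
def emitPairs : List (List Char) → List Char
  | a :: b :: rest => a ++ '\n' :: (b ++ ' ' :: emitPairs rest)
  | [a] => a ++ ['\n']
  | [] => []

def text_split_alt (to_split : String) : String :=
  String.ofList (emitPairs (PySem.Chars.splitOn to_split.toList [' ']))

-- ===== PRECONDITION & SPEC =====
def Spec_text_split (to_split : String) (out : String) : Prop := out = text_split_alt to_split
instance (to_split : String) (out : String) : Decidable (Spec_text_split to_split out) := by unfold Spec_text_split; infer_instance

-- ===== CLAIM (what is proved, stated in full; the proofs are below) =====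
def Claim_equal_text_split : Prop := ∀ (to_split : String), Dom_text_split to_split → Spec_text_split to_split (text_split to_split)

-- ===== LEMMAS AND PROOFS =====
theorem foldl_enumerate_eq_emitPairs (ws : List (List Char)) (n : Int) (acc : List Char)
    (hn : n % 2 = 0) :
    (PySem.List.enumerate ws n).foldl
      (fun result jk =>
        if jk.1 % 2 == 0 then result ++ jk.2 ++ ['\n'] else result ++ jk.2 ++ [' ']) acc
      = acc ++ emitPairs ws := by
  match ws with
  | [] => simp [PySem.List.enumerate, emitPairs]
  | [a] =>
    simp [PySem.List.enumerate, emitPairs, List.foldl, hn]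
  | a :: b :: rest =>
    have h1 : (n + 1) % 2 = 1 := by omega
    have h2 : (n + 1 + 1) % 2 = 0 := by omega
    rw [PySem.List.enumerate_cons, PySem.List.enumerate_cons]
    simp only [List.foldl_cons, hn, h1]
    rw [foldl_enumerate_eq_emitPairs rest (n + 1 + 1) _ h2]
    simp [emitPairs]

-- ===== VERDICT (by name: the statement is the Claim_ definition above) =====
theorem text_split_spec : Claim_equal_text_split := by
  intro s _
  unfold Spec_text_split text_split text_split_alt
  exact congrArg String.ofList (foldl_enumerate_eq_emitPairs _ 0 [] (by omega))
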